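-- pv_equiv track=rewrite | github.com/m-r-hunt/player-255 | filters.py | filter_remove_title_credits
-- ===== SOURCE A (Python) =====
-- def filter_remove_title_credits(list):
--     out = []
--     for s in list:
--         splits = s.split("-")
--         splits = [s for ss in splits for s in ss.split(".")]
--         if "title" in splits or "credits" in splits:
--             continue
--         out.append(s)
--     return out
-- ===== SOURCE B (Python) =====
-- def _is_tc(tok):
--     return tok == "title" or tok == "credits"
--
--
-- def _has_token(s):
--     # Single pass over the characters: build the current token, check it at
--     # each delimiter and at the end; no intermediate token lists.
--     tok = ""
--     bad = False
--     for c in s: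
--         if c == "-" or c == ".":
--             bad = bad or _is_tc(tok)
--             tok = ""
--         else:
--             tok += c
--     return bad or _is_tc(tok)
--
--
-- def filter_remove_title_credits(list):
--     return [s for s in list if not _has_token(s)]
-- ===== Notes on version B (the rewrite author's own statement) =====
-- stated objective: simpler
-- what changed: Replaces the two-level split (on '-', then each piece on '.') plus list-membership test by a single character-by-character pass that checks each delimiter-bounded token as it completes, keeping strings via a list comprehension; no intermediate token lists are built.
import Mathlib
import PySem

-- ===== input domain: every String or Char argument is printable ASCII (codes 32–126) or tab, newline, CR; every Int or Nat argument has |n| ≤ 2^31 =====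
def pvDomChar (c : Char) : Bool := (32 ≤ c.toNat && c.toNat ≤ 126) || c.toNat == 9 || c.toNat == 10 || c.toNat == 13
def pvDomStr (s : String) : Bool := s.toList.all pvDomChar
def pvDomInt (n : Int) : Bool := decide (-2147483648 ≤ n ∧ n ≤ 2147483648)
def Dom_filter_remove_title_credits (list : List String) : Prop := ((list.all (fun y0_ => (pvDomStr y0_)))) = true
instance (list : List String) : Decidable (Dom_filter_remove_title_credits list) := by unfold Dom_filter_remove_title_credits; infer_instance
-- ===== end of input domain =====

-- B replaces A's two-level split + token-list membership test by a single
-- character pass per string that checks each delimiter-bounded token as it is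
-- completed (simpler: no intermediate token lists).


-- ===== PORT A =====
-- A: for each s, split on "-", re-split each piece on ".", skip s when "title"
-- or "credits" is among the tokens; otherwise append s to out.
def filter_remove_title_credits (list : List String) : List String :=
  list.foldl (fun out s =>
    let splits := PySem.Chars.splitOn s.toList "-".toList
    let splits := splits.flatMap (fun ss => PySem.Chars.splitOn ss ".".toList)
    if "title".toList ∈ splits ∨ "credits".toList ∈ splits then out
    else out ++ [s]) []

-- ===== PORT B =====
-- Source B's _is_tc.
def pvIsBad (t : List Char) : Bool := t == "title".toList || t == "credits".toList

-- Source B's _has_token: one pass with state (bad, tok); tok += c ported as tok ++ [c].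
def pvHasToken (s : String) : Bool :=
  let r := s.toList.foldl (fun acc c =>
    if c = '-' ∨ c = '.' then (acc.1 || pvIsBad acc.2, [])
    else (acc.1, acc.2 ++ [c])) (false, [])
  r.1 || pvIsBad r.2

def filter_remove_title_credits_alt (list : List String) : List String :=
  list.filter (fun s => !pvHasToken s)

-- ===== PRECONDITION & SPEC =====
def Spec_filter_remove_title_credits (list : List String) (out : List String) : Prop := out = filter_remove_title_credits_alt list
instance (list : List String) (out : List String) : Decidable (Spec_filter_remove_title_credits list out) := by unfold Spec_filter_remove_title_credits; infer_instance

-- ===== CLAIM (what is proved, stated in full; the proofs are below) =====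
def Claim_equal_filter_remove_title_credits : Prop := ∀ (list : List String), Dom_filter_remove_title_credits list → Spec_filter_remove_title_credits list (filter_remove_title_credits list)

-- ===== LEMMAS AND PROOFS =====

-- Structural splitter on one delimiter char: head token and remaining tokens.
def pvSplitC (d : Char) : List Char → List Char × List (List Char)
  | [] => ([], [])
  | c :: cs =>
    let r := pvSplitC d cs
    if c = d then ([], r.1 :: r.2) else (c :: r.1, r.2)

-- Splitter on either delimiter '-' or '.'.
def pvSplitP : List Char → List Char × List (List Char)
  | [] => ([], [])
  | c :: cs =>
    let r := pvSplitP cs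
    if c = '-' ∨ c = '.' then ([], r.1 :: r.2) else (c :: r.1, r.2)

-- PySem's fuel-driven splitOn on a one-char separator is the structural splitter.
theorem pvSplitOn_go_eq (d : Char) (cs : List Char) :
    ∀ (fuel : Nat), cs.length ≤ fuel → ∀ (cur : List Char) (acc : List (List Char)),
    PySem.Chars.splitOn.go [d] fuel cs cur acc
      = acc.reverse ++ ((cur.reverse ++ (pvSplitC d cs).1) :: (pvSplitC d cs).2) := by
  induction cs with
  | nil =>
    intro fuel _ cur acc
    cases fuel <;> simp [PySem.Chars.splitOn.go, pvSplitC]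
  | cons c cs ih =>
    intro fuel hf cur acc
    cases fuel with
    | zero => simp at hf
    | succ n =>
      have hstep : PySem.Chars.splitOn.go [d] (n+1) (c :: cs) cur acc
          = if List.isPrefixOf [d] (c :: cs) then
              PySem.Chars.splitOn.go [d] n (List.drop 1 (c :: cs)) [] (cur.reverse :: acc)
            else PySem.Chars.splitOn.go [d] n cs (c :: cur) acc := rfl
      rw [hstep]
      by_cases hd : c = d
      · subst hd
        rw [if_pos (by simp [List.isPrefixOf])]
        simp only [List.drop_one, List.tail_cons]
        rw [ih n (by simp only [List.length_cons] at hf; omega) [] (cur.reverse :: acc)]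
        simp [pvSplitC]
      · rw [if_neg (by simp [List.isPrefixOf]; exact fun h => hd h.symm)]
        rw [ih n (by simp only [List.length_cons] at hf; omega) (c :: cur) acc]
        simp [pvSplitC, hd]

theorem pvSplitOn_eq (d : Char) (cs : List Char) :
    PySem.Chars.splitOn cs [d] = (pvSplitC d cs).1 :: (pvSplitC d cs).2 := by
  unfold PySem.Chars.splitOn
  rw [pvSplitOn_go_eq d cs (cs.length + 1) (by omega) [] []]
  simp

-- The two-level split produces exactly the tokens of the either-delimiter split.
theorem pvFlatMap_eq (cs : List Char) :
    ((pvSplitC '.' (pvSplitC '-' cs).1).1 :: (pvSplitC '.' (pvSplitC '-' cs).1).2)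
      ++ ((pvSplitC '-' cs).2).flatMap
           (fun ss => (pvSplitC '.' ss).1 :: (pvSplitC '.' ss).2)
      = (pvSplitP cs).1 :: (pvSplitP cs).2 := by
  induction cs with
  | nil => simp [pvSplitC, pvSplitP]
  | cons c cs ih =>
    simp only [List.cons_append, List.cons.injEq] at ih
    obtain ⟨ihA, ihB⟩ := ih
    by_cases h1 : c = '-'
    · subst h1
      simp [pvSplitC, pvSplitP, ihA, ihB]
    · by_cases h2 : c = '.'
      · subst h2
        simp [pvSplitC, pvSplitP, h1, ihA, ihB]
      · simp [pvSplitC, pvSplitP, h1, h2, ihA, ihB]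

-- B's fold computes: a bad token was closed earlier, or the open token is bad.
theorem pvFold_eq (cs : List Char) : ∀ (bad : Bool) (tok : List Char),
    ((cs.foldl (fun acc c =>
        if c = '-' ∨ c = '.' then (acc.1 || pvIsBad acc.2, ([] : List Char))
        else (acc.1, acc.2 ++ [c])) (bad, tok)).1
      || pvIsBad (cs.foldl (fun acc c =>
        if c = '-' ∨ c = '.' then (acc.1 || pvIsBad acc.2, ([] : List Char))
        else (acc.1, acc.2 ++ [c])) (bad, tok)).2)
    = (bad || pvIsBad (tok ++ (pvSplitP cs).1) || (pvSplitP cs).2.any pvIsBad) := by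
  induction cs with
  | nil => intro bad tok; simp [pvSplitP]
  | cons c cs ih =>
    intro bad tok
    by_cases h : c = '-' ∨ c = '.'
    · simp only [List.foldl_cons, if_pos h]
      rw [ih]
      simp [pvSplitP, h, Bool.or_assoc]
    · simp only [List.foldl_cons, if_neg h]
      rw [ih]
      simp [pvSplitP, h]

theorem pvAnyBad (l : List (List Char)) :
    decide ("title".toList ∈ l ∨ "credits".toList ∈ l) = l.any pvIsBad := by
  rw [Bool.eq_iff_iff]
  simp only [decide_eq_true_eq, List.any_eq_true, pvIsBad, Bool.or_eq_true, beq_iff_eq]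
  constructor
  · rintro (h | h)
    · exact ⟨_, h, Or.inl rfl⟩
    · exact ⟨_, h, Or.inr rfl⟩
  · rintro ⟨x, hx, rfl | rfl⟩
    · exact Or.inl hx
    · exact Or.inr hx

-- Per string: A's token-membership test equals B's one-pass scan.
theorem pvPerString (s : String) :
    decide ("title".toList ∈ (PySem.Chars.splitOn s.toList "-".toList).flatMap
        (fun ss => PySem.Chars.splitOn ss ".".toList)
      ∨ "credits".toList ∈ (PySem.Chars.splitOn s.toList "-".toList).flatMap
        (fun ss => PySem.Chars.splitOn ss ".".toList))
      = pvHasToken s := by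
  have hfm : (PySem.Chars.splitOn s.toList "-".toList).flatMap
      (fun ss => PySem.Chars.splitOn ss ".".toList)
      = (pvSplitP s.toList).1 :: (pvSplitP s.toList).2 := by
    rw [show ("-" : String).toList = ['-'] from rfl, pvSplitOn_eq]
    rw [← pvFlatMap_eq s.toList]
    simp [show ("." : String).toList = ['.'] from rfl, pvSplitOn_eq]
  rw [hfm, pvAnyBad]
  unfold pvHasToken
  rw [pvFold_eq s.toList false []]
  simp

-- ===== VERDICT (by name: the statement is the Claim_ definition above) =====
theorem filter_remove_title_credits_spec : Claim_equal_filter_remove_title_credits := by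
  intro list _
  unfold Spec_filter_remove_title_credits filter_remove_title_credits filter_remove_title_credits_alt
  have hfun : (fun (out : List String) (s : String) =>
      let splits := PySem.Chars.splitOn s.toList "-".toList
      let splits := splits.flatMap (fun ss => PySem.Chars.splitOn ss ".".toList)
      if "title".toList ∈ splits ∨ "credits".toList ∈ splits then out
      else out ++ [s])
      = (fun (out : List String) (s : String) =>
        if (!pvHasToken s) = true then out ++ [id s] else out) := by
    funext out s
    show (if "title".toList ∈ (PySem.Chars.splitOn s.toList "-".toList).flatMap
            (fun ss => PySem.Chars.splitOn ss ".".toList)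
          ∨ "credits".toList ∈ (PySem.Chars.splitOn s.toList "-".toList).flatMap
            (fun ss => PySem.Chars.splitOn ss ".".toList)
        then out else out ++ [s]) = _
    by_cases h : ("title".toList ∈ (PySem.Chars.splitOn s.toList "-".toList).flatMap
        (fun ss => PySem.Chars.splitOn ss ".".toList)
      ∨ "credits".toList ∈ (PySem.Chars.splitOn s.toList "-".toList).flatMap
        (fun ss => PySem.Chars.splitOn ss ".".toList))
    · rw [if_pos h]
      have hb : pvHasToken s = true := by rw [← pvPerString s]; exact decide_eq_true h
      simp [hb]
    · rw [if_neg h]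
      have hb : pvHasToken s = false := by rw [← pvPerString s]; exact decide_eq_false h
      simp [hb]
  rw [hfun, PySem.List.foldl_append_if (fun s => !pvHasToken s) id list []]
  simp
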